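-- pv_equiv track=rewrite | github.com/ben-tilden/Personal-Archiver | archiver.py | homeCheck
-- ===== SOURCE A (Python) =====
-- def homeCheck(homeDirList, userDirList, isHomeSequence):
--     """Return series of home directories that are not in user's path.
--
--     Possible outcomes:
--     (1) Pop the first directory from both directory lists if equal
--     (2) Pop only the first directory from homeDirList if it is not
--         equal to the first directory of userDirList
--     (3) Return only the user directories past the home directories if
--         there is a sequence of home directories at the beginning of the
--         user directory, None otherwise
--
--     Arguments:
--     homeDirList -- list of directories in the user's home directory
--     userDirList -- list of directories in path given by user
--     isHomeSequence -- bool indicates if there is a sequence of matches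
--     """
--     if len(homeDirList) != 0 and len(userDirList) != 0:
--         if homeDirList[0] == userDirList[0]:
--             isHomeSequence = True
--             homeDirList.pop(0)
--             userDirList.pop(0)
--             return homeCheck(homeDirList, userDirList, isHomeSequence)
--         else:
--             if isHomeSequence:
--                 return None
--             else:
--                 homeDirList.pop(0)
--                 return homeCheck(homeDirList, userDirList, isHomeSequence)
--     elif len(homeDirList) != 0 and len(userDirList) == 0:
--         # Handle case where homeDir=/Users/user and userDir=/Users
--         # (didn't want to mess with permissions in this instance)
--         return None
--     else:
--         if isHomeSequence:
--             return userDirList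
--         else:
--             return None
-- ===== SOURCE B (Python) =====
-- def homeCheck(homeDirList, userDirList, isHomeSequence):
--     """Non-recursive re-implementation: locate the first home dir equal to the
--     user path's head, then check the remaining home dirs form a prefix of the
--     user path and return the rest. (Does not mutate its arguments, unlike A;
--     equivalence is about the return value.)"""
--     if isHomeSequence:
--         k = 0
--     else:
--         if not userDirList or userDirList[0] not in homeDirList:
--             return None
--         k = homeDirList.index(userDirList[0])
--     tail = homeDirList[k:]
--     if userDirList[:len(tail)] == tail:
--         return userDirList[len(tail):]
--     return None
-- ===== Notes on version B (the rewrite author's own statement) =====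
-- stated objective: faster
-- what changed: Replaced the O(n^2) recursion with pop(0) by a single index/prefix check: find the first home dir equal to the user path's head, then compare the remaining home dirs as a prefix of the user path.
import Mathlib
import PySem

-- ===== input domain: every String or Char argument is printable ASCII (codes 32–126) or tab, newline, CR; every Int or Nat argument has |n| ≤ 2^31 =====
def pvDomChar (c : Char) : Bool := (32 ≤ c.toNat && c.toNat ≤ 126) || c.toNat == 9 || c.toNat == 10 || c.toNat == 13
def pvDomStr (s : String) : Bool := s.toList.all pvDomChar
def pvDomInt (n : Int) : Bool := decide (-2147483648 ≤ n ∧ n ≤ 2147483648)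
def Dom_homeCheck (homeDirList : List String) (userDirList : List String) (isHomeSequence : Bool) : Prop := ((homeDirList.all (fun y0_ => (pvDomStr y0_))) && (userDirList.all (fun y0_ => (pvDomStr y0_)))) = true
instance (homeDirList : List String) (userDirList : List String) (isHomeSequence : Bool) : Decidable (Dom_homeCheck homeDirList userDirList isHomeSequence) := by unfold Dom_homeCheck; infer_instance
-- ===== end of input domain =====

-- B replaces A's pop(0) recursion by a single index/prefix check (return value only; the Python A mutates its list arguments).


-- ===== PORT A =====
-- literal transliteration of A's recursion (return value only; the Python mutates
-- its list arguments via pop(0), which is not modelled here)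
def homeCheck (homeDirList : List String) (userDirList : List String) (isHomeSequence : Bool) : Option (List String) :=
  match homeDirList, userDirList with
  | h :: hs, u :: us =>
      if h == u then homeCheck hs us true
      else if isHomeSequence then none
      else homeCheck hs (u :: us) isHomeSequence
  | _ :: _, [] => none
  | [], _ => if isHomeSequence then some userDirList else none

-- ===== PORT B =====
-- transliteration of Source B: index of first matching home dir, then a prefix check
def homeCheck_alt (homeDirList : List String) (userDirList : List String) (isHomeSequence : Bool) : Option (List String) :=
  let k? : Option Nat :=
    if isHomeSequence then some 0
    else
      match userDirList with
      | [] => none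
      | u :: _ => PySem.List.index? homeDirList u
  match k? with
  | none => none
  | some k =>
      let tail := homeDirList.drop k
      if userDirList.take tail.length == tail then some (userDirList.drop tail.length)
      else none

-- ===== PRECONDITION & SPEC =====
def Spec_homeCheck (homeDirList : List String) (userDirList : List String) (isHomeSequence : Bool) (out : Option (List String)) : Prop := out = homeCheck_alt homeDirList userDirList isHomeSequence
instance (homeDirList : List String) (userDirList : List String) (isHomeSequence : Bool) (out : Option (List String)) : Decidable (Spec_homeCheck homeDirList userDirList isHomeSequence out) := by unfold Spec_homeCheck; infer_instance

-- ===== CLAIM (what is proved, stated in full; the proofs are below) =====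
def Claim_equal_homeCheck : Prop := ∀ (homeDirList : List String) (userDirList : List String) (isHomeSequence : Bool), Dom_homeCheck homeDirList userDirList isHomeSequence → Spec_homeCheck homeDirList userDirList isHomeSequence (homeCheck homeDirList userDirList isHomeSequence)

-- ===== LEMMAS AND PROOFS =====

-- ===== VERDICT (by name: the statement is the Claim_ definition above) =====
-- seq-true case: A's recursion with isHomeSequence = true is the prefix check
theorem homeCheck_true_eq (hs us : List String) :
    homeCheck hs us true =
      (if us.take hs.length == hs then some (us.drop hs.length) else none) := by
  induction hs generalizing us with
  | nil => simp [homeCheck]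
  | cons h t ih =>
    cases us with
    | nil => simp [homeCheck]
    | cons u us =>
      by_cases hu : h = u
      · subst hu
        simp [homeCheck, ih]
      · simp [homeCheck, hu, beq_iff_eq, Ne.symm hu]

theorem alt_false_cons (hs : List String) (u : String) (us : List String) :
    homeCheck_alt hs (u :: us) false =
      match PySem.List.index? hs u with
      | none => none
      | some k =>
        if (u :: us).take (hs.drop k).length == hs.drop k then
          some ((u :: us).drop (hs.drop k).length)
        else none := rfl

theorem homeCheck_eq_alt (hs us : List String) (b : Bool) :
    homeCheck hs us b = homeCheck_alt hs us b := by
  cases b with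
  | true =>
    simp [homeCheck_alt, homeCheck_true_eq]
  | false =>
    induction hs generalizing us with
    | nil =>
      cases us <;> simp [homeCheck, homeCheck_alt]
    | cons h t ih =>
      cases us with
      | nil => simp [homeCheck, homeCheck_alt]
      | cons u us =>
        by_cases hu : h = u
        · subst hu
          rw [show homeCheck (h :: t) (h :: us) false = homeCheck t us true from by
            simp [homeCheck]]
          rw [homeCheck_true_eq, alt_false_cons, PySem.List.index?_cons_self]
          by_cases hp : List.take t.length us = t <;> simp [hp]
        · rw [show homeCheck (h :: t) (u :: us) false = homeCheck t (u :: us) false from by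
            simp [homeCheck, hu]]
          rw [ih (u :: us), alt_false_cons, alt_false_cons,
            PySem.List.index?_cons_of_ne t hu]
          cases hx : PySem.List.index? t u <;> simp

theorem homeCheck_spec : Claim_equal_homeCheck := by
  intro hs us b _
  unfold Spec_homeCheck
  exact homeCheck_eq_alt hs us b
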